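-- pv_equiv track=rewrite | github.com/bhargavraju/practice-dsa | dynamic_programming/frog_jump.py | solve
-- ===== SOURCE A (Python) =====
-- def solve(A):
--     if A[1] - A[0] != 1:
--         return 0
--     n = len(A)
--     k_vals_map = {pos: set() for pos in A}
--     k_vals_map[A[1]].add(1)
--     for i in range(n-1):
--         pos = A[i]
--         for k in k_vals_map[pos]:
--             for new_k in (k-1, k, k+1):
--                 if new_k > 0 and pos + new_k in k_vals_map:
--                     k_vals_map[pos + new_k].add(new_k)
--     if len(k_vals_map[A[-1]]) > 0:
--         return 1
--     return 0
-- ===== SOURCE B (Python) =====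
-- def solve(A):
--     if A[1] - A[0] != 1:
--         return 0
--     start = A[1]
--     K = []
--     for pos in A:
--         ks = {1} if pos == start else set()
--         for q, prev in zip(A, K):
--             gap = pos - q
--             if gap > 0 and any(gap - 1 <= k <= gap + 1 for k in prev):
--                 ks.add(gap)
--         K.append(ks)
--     return 1 if len(K[-1]) > 0 else 0
-- ===== Notes on version B (the rewrite author's own statement) =====
-- stated objective: alternative
-- what changed: A pushes jump sizes forward through a mutable dict keyed by stone position; B uses a pull-style index DP with no dict: for each list index i it builds the jump-set for A[i] by scanning all earlier indices j and testing the gap A[i]-A[j] against K[j], answering from the last row.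
import Mathlib
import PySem

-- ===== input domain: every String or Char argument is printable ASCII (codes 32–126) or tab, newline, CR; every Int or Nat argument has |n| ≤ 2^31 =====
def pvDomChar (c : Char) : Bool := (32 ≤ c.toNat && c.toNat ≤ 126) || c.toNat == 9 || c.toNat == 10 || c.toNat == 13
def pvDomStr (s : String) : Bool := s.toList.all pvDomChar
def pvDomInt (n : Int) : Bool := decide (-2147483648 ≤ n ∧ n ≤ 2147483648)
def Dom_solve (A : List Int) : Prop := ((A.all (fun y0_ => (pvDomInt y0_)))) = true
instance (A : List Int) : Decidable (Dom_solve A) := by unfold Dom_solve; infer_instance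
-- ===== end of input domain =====

-- B replaces A's push-style propagation through a mutable dict keyed by stone position by a
-- pull-style index DP: row i collects the jump sizes available at A[i] by scanning all earlier
-- indices; same return value, alternative structure (not faster).

-- ===== PORT A =====
-- 'if new_k > 0 and pos + new_k in k_vals_map: k_vals_map[pos + new_k].add(new_k)'
def addIf (pos : Int) (d : PySem.Dict Int (PySem.Set Int)) (nk : Int) :
    PySem.Dict Int (PySem.Set Int) :=
  if nk > 0 && d.contains (pos + nk) then
    d.modify (pos + nk) PySem.Set.empty (fun s => PySem.Set.add s nk)
  else d

-- 'for new_k in (k-1, k, k+1): …'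
def stepK (pos : Int) (d : PySem.Dict Int (PySem.Set Int)) (k : Int) :
    PySem.Dict Int (PySem.Set Int) :=
  [k - 1, k, k + 1].foldl (addIf pos) d

-- 'for k in k_vals_map[pos]: …' — the iterated set is never mutated during this loop
-- (every addition goes to the strictly larger key pos + new_k), so folding over its
-- snapshot is exact; the Lean Set's list order stands in for Python's set iteration
-- order, which cannot affect the final sets' contents (additions only).
def stepPos (d : PySem.Dict Int (PySem.Set Int)) (pos : Int) :
    PySem.Dict Int (PySem.Set Int) :=
  (d.getD pos PySem.Set.empty).foldl (stepK pos) d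

def solve (A : List Int) : Int :=
  let a0 := (PySem.List.pyGet? A 0).getD 0   -- A[0]; none (IndexError) is excluded by Pre_solve
  let a1 := (PySem.List.pyGet? A 1).getD 0   -- A[1]; idem
  if a1 - a0 ≠ 1 then 0
  else
    let n : Int := A.length
    -- '{pos: set() for pos in A}' (duplicate keys overwrite in place, like Python)
    let m0 : PySem.Dict Int (PySem.Set Int) :=
      A.foldl (fun d pos => d.insert pos PySem.Set.empty) PySem.Dict.empty
    -- 'k_vals_map[A[1]].add(1)'  (key A[1] always present)
    let m1 := m0.modify a1 PySem.Set.empty (fun s => PySem.Set.add s 1)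
    -- 'for i in range(n-1): pos = A[i]; …'
    let m2 := (PySem.List.pyRange 0 (n - 1) 1).foldl
      (fun d i => stepPos d (PySem.List.pyGetD A i 0)) m1
    if 0 < PySem.Set.len (m2.getD (PySem.List.pyGetD A (-1) 0) PySem.Set.empty) then 1 else 0

-- ===== PORT B =====
-- the body of 'for q, prev in zip(A, K): gap = pos - q; if gap > 0 and any(…): ks.add(gap)'
def innerB (pos : Int) (ks : PySem.Set Int) (qp : Int × PySem.Set Int) : PySem.Set Int :=
  if pos - qp.1 > 0 &&
      qp.2.any (fun k => decide (pos - qp.1 - 1 ≤ k) && decide (k ≤ pos - qp.1 + 1)) then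
    PySem.Set.add ks (pos - qp.1)
  else ks

-- one row: "ks = {1} if pos == start else set()" then the inner zip loop
def rowB (start pos : Int) (pairs : List (Int × PySem.Set Int)) : PySem.Set Int :=
  pairs.foldl (innerB pos) (if pos == start then PySem.Set.ofList [1] else PySem.Set.empty)

def solve_alt (A : List Int) : Int :=
  let a0 := (PySem.List.pyGet? A 0).getD 0   -- A[0]; none (IndexError) is excluded by Pre_solve
  let a1 := (PySem.List.pyGet? A 1).getD 0
  if a1 - a0 ≠ 1 then 0
  else
    -- 'for pos in A: … K.append(ks)'
    let K := A.foldl (fun K pos => K ++ [rowB a1 pos (A.zip K)]) ([] : List (PySem.Set Int))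
    if 0 < PySem.Set.len (PySem.List.pyGetD K (-1) PySem.Set.empty) then 1 else 0

-- ===== PRECONDITION & SPEC =====
-- A evaluates A[1] before anything else: on lists of length < 2 it raises IndexError.
def Pre_solve (A : List Int) : Prop := 2 ≤ A.length
instance (A : List Int) : Decidable (Pre_solve A) := by unfold Pre_solve; infer_instance
def pvWitness_solve : List Int := [0, 1, 3]

def Spec_solve (A : List Int) (out : Int) : Prop := out = solve_alt A
instance (A : List Int) (out : Int) : Decidable (Spec_solve A out) := by unfold Spec_solve; infer_instance

-- ===== CLAIM (what is proved, stated in full; the proofs are below) =====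
def Claim_equal_solve : Prop := ∀ (A : List Int), Dom_solve A → Pre_solve A → Spec_solve A (solve A)

-- ===== LEMMAS AND PROOFS =====

-- A's initial dict: every stone mapped to ∅, then 1 added at key a1
def initD (A : List Int) (a1 : Int) : PySem.Dict Int (PySem.Set Int) :=
  (A.foldl (fun d pos => d.insert pos PySem.Set.empty) PySem.Dict.empty).modify a1
    PySem.Set.empty (fun s => PySem.Set.add s 1)

-- A's dict after the first j iterations of its loop
def dAt (A : List Int) (a1 : Int) (j : ℕ) : PySem.Dict Int (PySem.Set Int) :=
  (A.take j).foldl stepPos (initD A a1)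

-- B's list K after the first i iterations of its loop
def rowsB (A : List Int) (a1 : Int) : ℕ → List (PySem.Set Int)
  | 0 => []
  | i + 1 => rowsB A a1 i ++ [rowB a1 (A.getD i 0) (A.zip (rowsB A a1 i))]

def rowAt (A : List Int) (a1 : Int) (j : ℕ) : PySem.Set Int :=
  rowB a1 (A.getD j 0) (A.zip (rowsB A a1 j))

theorem contains_addIf (pos : Int) (d : PySem.Dict Int (PySem.Set Int)) (nk r : Int) :
    (addIf pos d nk).contains r = d.contains r := by
  unfold addIf; split
  · rename_i h
    simp only [Bool.and_eq_true, decide_eq_true_eq] at h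
    simp only [PySem.Dict.contains_modify]
    by_cases hr : r = pos + nk
    · simp [hr, h.2]
    · simp [hr]
  · rfl

theorem contains_stepK (pos : Int) (d : PySem.Dict Int (PySem.Set Int)) (k r : Int) :
    (stepK pos d k).contains r = d.contains r := by
  simp [stepK, List.foldl, contains_addIf]

theorem contains_foldl_stepK (pos : Int) (l : List Int) (d : PySem.Dict Int (PySem.Set Int))
    (r : Int) : (l.foldl (stepK pos) d).contains r = d.contains r := by
  induction l generalizing d with
  | nil => rfl
  | cons k t ih => simp [List.foldl, ih, contains_stepK]

theorem contains_stepPos (d : PySem.Dict Int (PySem.Set Int)) (pos r : Int) :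
    (stepPos d pos).contains r = d.contains r :=
  contains_foldl_stepK pos _ d r

theorem contains_dAt (A : List Int) (a1 : Int) (j : ℕ) (r : Int) :
    (dAt A a1 j).contains r = (initD A a1).contains r := by
  unfold dAt
  induction A.take j using List.reverseRecOn with
  | nil => rfl
  | append_singleton t x ih => rw [List.foldl_append, List.foldl_cons, List.foldl_nil,
      contains_stepPos, ih]

theorem mem_getD_addIf (pos : Int) (d : PySem.Dict Int (PySem.Set Int)) (nk q k' : Int) :
    k' ∈ (addIf pos d nk).getD q PySem.Set.empty ↔
      k' ∈ d.getD q PySem.Set.empty ∨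
        (k' = nk ∧ 0 < nk ∧ q = pos + nk ∧ d.contains (pos + nk) = true) := by
  unfold addIf
  split
  · rename_i h
    simp only [Bool.and_eq_true, decide_eq_true_eq] at h
    rw [PySem.Dict.getD_modify]
    split
    · rename_i hq
      subst hq
      rw [PySem.Set.mem_add]
      constructor
      · rintro (hm | rfl)
        · exact Or.inl hm
        · exact Or.inr ⟨rfl, h.1, rfl, h.2⟩
      · rintro (hm | ⟨rfl, _, _, _⟩)
        · exact Or.inl hm
        · exact Or.inr rfl
    · rename_i hq
      constructor
      · exact Or.inl
      · rintro (hm | ⟨_, _, hqe, _⟩)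
        · exact hm
        · exact absurd hqe hq
  · rename_i h
    simp only [Bool.and_eq_true, decide_eq_true_eq, not_and_or] at h
    constructor
    · exact Or.inl
    · rintro (hm | ⟨_, hpos, _, hc⟩)
      · exact hm
      · rcases h with h | h
        · exact absurd hpos h
        · exact absurd hc h

theorem mem_getD_stepK (pos : Int) (d : PySem.Dict Int (PySem.Set Int)) (k q k' : Int) :
    k' ∈ (stepK pos d k).getD q PySem.Set.empty ↔
      k' ∈ d.getD q PySem.Set.empty ∨
        ((k' = k - 1 ∨ k' = k ∨ k' = k + 1) ∧ 0 < k' ∧ q = pos + k' ∧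
          d.contains (pos + k') = true) := by
  show k' ∈ (addIf pos (addIf pos (addIf pos d (k - 1)) k) (k + 1)).getD q PySem.Set.empty ↔ _
  simp only [mem_getD_addIf, contains_addIf]
  constructor
  · rintro (((h | ⟨rfl, h2, h3, h4⟩) | ⟨rfl, h2, h3, h4⟩) | ⟨rfl, h2, h3, h4⟩)
    · exact Or.inl h
    · exact Or.inr ⟨Or.inl rfl, h2, h3, h4⟩
    · exact Or.inr ⟨Or.inr (Or.inl rfl), h2, h3, h4⟩
    · exact Or.inr ⟨Or.inr (Or.inr rfl), h2, h3, h4⟩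
  · rintro (h | ⟨rfl | rfl | rfl, h2, h3, h4⟩)
    · exact Or.inl (Or.inl (Or.inl h))
    · exact Or.inl (Or.inl (Or.inr ⟨rfl, h2, h3, h4⟩))
    · exact Or.inl (Or.inr ⟨rfl, h2, h3, h4⟩)
    · exact Or.inr ⟨rfl, h2, h3, h4⟩

theorem mem_getD_foldl_stepK (pos : Int) (l : List Int) (d : PySem.Dict Int (PySem.Set Int))
    (q k' : Int) :
    k' ∈ (l.foldl (stepK pos) d).getD q PySem.Set.empty ↔
      k' ∈ d.getD q PySem.Set.empty ∨
        ∃ k ∈ l, (k' = k - 1 ∨ k' = k ∨ k' = k + 1) ∧ 0 < k' ∧ q = pos + k' ∧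
          d.contains (pos + k') = true := by
  induction l generalizing d with
  | nil => simp
  | cons k t ih =>
    simp only [List.foldl_cons]
    rw [ih, mem_getD_stepK]
    simp only [contains_stepK, List.mem_cons]
    constructor
    · rintro ((h | h) | ⟨k₀, hk₀, h⟩)
      · exact Or.inl h
      · exact Or.inr ⟨k, Or.inl rfl, h⟩
      · exact Or.inr ⟨k₀, Or.inr hk₀, h⟩
    · rintro (h | ⟨k₀, hk₀ | hk₀, h⟩)
      · exact Or.inl (Or.inl h)
      · exact Or.inl (Or.inr (hk₀ ▸ h))
      · exact Or.inr ⟨k₀, hk₀, h⟩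

theorem mem_getD_stepPos (d : PySem.Dict Int (PySem.Set Int)) (pos q k' : Int) :
    k' ∈ (stepPos d pos).getD q PySem.Set.empty ↔
      k' ∈ d.getD q PySem.Set.empty ∨
        ∃ k ∈ d.getD pos PySem.Set.empty, (k' = k - 1 ∨ k' = k ∨ k' = k + 1) ∧ 0 < k' ∧
          q = pos + k' ∧ d.contains q = true := by
  unfold stepPos
  rw [mem_getD_foldl_stepK]
  constructor
  · rintro (h | ⟨k, hk, h1, h2, h3, h4⟩)
    · exact Or.inl h
    · exact Or.inr ⟨k, hk, h1, h2, h3, h3 ▸ h4⟩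
  · rintro (h | ⟨k, hk, h1, h2, h3, h4⟩)
    · exact Or.inl h
    · exact Or.inr ⟨k, hk, h1, h2, h3, h3 ▸ h4⟩

theorem getD_init_empty (A : List Int) (q : Int) :
    (A.foldl (fun (d : PySem.Dict Int (PySem.Set Int)) pos => d.insert pos PySem.Set.empty) PySem.Dict.empty).getD q
      PySem.Set.empty = PySem.Set.empty := by
  suffices h : ∀ (d : PySem.Dict Int (PySem.Set Int)),
      d.getD q PySem.Set.empty = PySem.Set.empty →
      (A.foldl (fun (d : PySem.Dict Int (PySem.Set Int)) pos => d.insert pos PySem.Set.empty) d).getD q PySem.Set.empty =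
        PySem.Set.empty by
    exact h _ (by simp [PySem.Dict.getD_empty])
  induction A with
  | nil => intro d hd; exact hd
  | cons x t ih =>
    intro d hd
    refine ih _ ?_
    rw [PySem.Dict.getD_insert]
    split <;> [rfl; exact hd]

theorem contains_init (A : List Int) (q : Int) :
    (A.foldl (fun (d : PySem.Dict Int (PySem.Set Int)) pos => d.insert pos PySem.Set.empty)
      PySem.Dict.empty).contains q = PySem.Set.contains (PySem.Set.ofList A) q := by
  have h1 : (A.foldl (fun (d : PySem.Dict Int (PySem.Set Int)) pos =>
      d.insert pos PySem.Set.empty) PySem.Dict.empty).contains q = true ↔ q ∈ A := by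
    rw [PySem.Dict.contains_iff_mem_keys,
      PySem.Dict.keys_foldl_insert A _ PySem.Dict.empty,
      show PySem.Dict.empty.keys = ([] : List Int) from rfl,
      PySem.Set.update_nil_left, PySem.Set.mem_ofList]
  have h2 : PySem.Set.contains (PySem.Set.ofList A) q = true ↔ q ∈ A := by
    rw [PySem.Set.contains_iff, PySem.Set.mem_ofList]
  rw [Bool.eq_iff_iff, h1, h2]

theorem contains_initD (A : List Int) (a1 q : Int) (ha1 : a1 ∈ A) :
    (initD A a1).contains q = true ↔ q ∈ A := by
  unfold initD
  rw [PySem.Dict.contains_modify]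
  by_cases hq : q = a1
  · subst hq; simp [ha1]
  · have hb : (q == a1) = false := by simp [hq]
    rw [hb, Bool.false_or, contains_init, PySem.Set.contains_iff, PySem.Set.mem_ofList]

theorem mem_initD (A : List Int) (a1 q k : Int) (_ha1 : a1 ∈ A) :
    k ∈ (initD A a1).getD q PySem.Set.empty ↔ (q = a1 ∧ k = 1) := by
  unfold initD
  rw [PySem.Dict.getD_modify]
  split
  · rename_i hq
    rw [getD_init_empty]
    simp [PySem.Set.empty, hq]
  · rename_i hq
    rw [getD_init_empty]
    simp [PySem.Set.empty, hq]

-- A-side characterisation: what is in the dict after j loop iterations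
theorem mem_dAt (A : List Int) (a1 : Int) (ha1 : a1 ∈ A) (j : ℕ) (hj : j ≤ A.length)
    (q k : Int) :
    k ∈ (dAt A a1 j).getD q PySem.Set.empty ↔
      (q = a1 ∧ k = 1) ∨
        ∃ i < j, 0 < k ∧ q = A.getD i 0 + k ∧ q ∈ A ∧
          ∃ k0 ∈ (dAt A a1 i).getD (A.getD i 0) PySem.Set.empty,
            (k = k0 - 1 ∨ k = k0 ∨ k = k0 + 1) := by
  induction j with
  | zero =>
    rw [show dAt A a1 0 = initD A a1 from rfl, mem_initD A a1 q k ha1]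
    simp
  | succ j ih =>
    have hjlt : j < A.length := hj
    have hstep : dAt A a1 (j + 1) = stepPos (dAt A a1 j) (A.getD j 0) := by
      unfold dAt
      rw [List.take_add_one, List.getElem?_eq_getElem hjlt, Option.toList_some,
        List.foldl_append, List.foldl_cons, List.foldl_nil, List.getD_eq_getElem A 0 hjlt]
    rw [hstep, mem_getD_stepPos, ih (Nat.le_of_lt hjlt)]
    have hcont : ((dAt A a1 j).contains q = true) ↔ q ∈ A := by
      rw [contains_dAt, contains_initD A a1 q ha1]
    constructor
    · rintro ((h | ⟨i, hi, h⟩) | ⟨k0, hk0, h1, h2, h3, h4⟩)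
      · exact Or.inl h
      · exact Or.inr ⟨i, Nat.lt_succ_of_lt hi, h⟩
      · exact Or.inr ⟨j, Nat.lt_succ_self j, h2, h3, hcont.mp h4, k0, hk0, h1⟩
    · rintro (h | ⟨i, hi, h2, h3, h4, k0, hk0, h1⟩)
      · exact Or.inl (Or.inl h)
      · rcases Nat.lt_succ_iff_lt_or_eq.mp hi with hi' | rfl
        · exact Or.inl (Or.inr ⟨i, hi', h2, h3, h4, k0, hk0, h1⟩)
        · exact Or.inr ⟨k0, hk0, h1, h2, h3, hcont.mpr h4⟩

-- B-side: membership in a row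
theorem mem_foldl_innerB (pos : Int) (pairs : List (Int × PySem.Set Int))
    (s : PySem.Set Int) (k : Int) :
    k ∈ pairs.foldl (innerB pos) s ↔
      k ∈ s ∨ ∃ p ∈ pairs, k = pos - p.1 ∧ 0 < k ∧
        ∃ k' ∈ p.2, k - 1 ≤ k' ∧ k' ≤ k + 1 := by
  induction pairs generalizing s with
  | nil => simp
  | cons p t ih =>
    rw [List.foldl_cons, ih]
    have hstep : k ∈ innerB pos s p ↔
        k ∈ s ∨ (k = pos - p.1 ∧ 0 < k ∧ ∃ k' ∈ p.2, k - 1 ≤ k' ∧ k' ≤ k + 1) := by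
      unfold innerB
      split
      · rename_i h
        simp only [Bool.and_eq_true, decide_eq_true_eq, List.any_eq_true,
          Bool.and_eq_true, decide_eq_true_eq] at h
        rw [PySem.Set.mem_add]
        constructor
        · rintro (hm | rfl)
          · exact Or.inl hm
          · obtain ⟨k', hk', h1, h2⟩ := h.2
            exact Or.inr ⟨rfl, h.1, k', hk', h1, h2⟩
        · rintro (hm | ⟨rfl, _, _⟩)
          · exact Or.inl hm
          · exact Or.inr rfl
      · rename_i h
        simp only [Bool.and_eq_true, decide_eq_true_eq, List.any_eq_true,
          Bool.and_eq_true, decide_eq_true_eq, not_and_or] at h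
        constructor
        · exact Or.inl
        · rintro (hm | ⟨rfl, hpos, k', hk', h1, h2⟩)
          · exact hm
          · rcases h with h | h
            · exact absurd hpos h
            · exact absurd ⟨k', hk', h1, h2⟩ h
    rw [hstep]
    simp only [List.mem_cons]
    constructor
    · rintro ((h | h) | ⟨p0, hp0, h⟩)
      · exact Or.inl h
      · exact Or.inr ⟨p, Or.inl rfl, h⟩
      · exact Or.inr ⟨p0, Or.inr hp0, h⟩
    · rintro (h | ⟨p0, hp0 | hp0, h⟩)
      · exact Or.inl (Or.inl h)
      · exact Or.inl (Or.inr (hp0 ▸ h))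
      · exact Or.inr ⟨p0, hp0, h⟩

theorem mem_rowB (start pos : Int) (pairs : List (Int × PySem.Set Int)) (k : Int) :
    k ∈ rowB start pos pairs ↔
      (pos = start ∧ k = 1) ∨ ∃ p ∈ pairs, k = pos - p.1 ∧ 0 < k ∧
        ∃ k' ∈ p.2, k - 1 ≤ k' ∧ k' ≤ k + 1 := by
  unfold rowB
  rw [mem_foldl_innerB]
  refine or_congr ?_ Iff.rfl
  split
  · rename_i h
    simp only [beq_iff_eq] at h
    simp [PySem.Set.ofList, PySem.Set.add, PySem.Set.empty, h]
  · rename_i h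
    simp only [beq_iff_eq] at h
    simp [PySem.Set.empty, h]

theorem length_rowsB (A : List Int) (a1 : Int) (i : ℕ) : (rowsB A a1 i).length = i := by
  induction i with
  | zero => rfl
  | succ i ih => simp [rowsB, ih]

theorem rowsB_eq_map (A : List Int) (a1 : Int) (i : ℕ) :
    rowsB A a1 i = (List.range i).map (rowAt A a1) := by
  induction i with
  | zero => rfl
  | succ i ih => rw [rowsB, List.range_succ, List.map_append, ← ih]; rfl

-- the snapshot correspondence: B's row j has exactly the contents A's dict holds at key A[j]
-- at the start of A's j-th iteration
theorem row_eq_snapshot (A : List Int) (a1 : Int) (ha1 : a1 ∈ A) (j : ℕ) (hj : j < A.length)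
    (k : Int) :
    k ∈ rowAt A a1 j ↔ k ∈ (dAt A a1 j).getD (A.getD j 0) PySem.Set.empty := by
  revert hj k
  induction j using Nat.strong_induction_on with
  | _ j ih =>
    intro hj k
    rw [rowAt, mem_rowB, mem_dAt A a1 ha1 j (Nat.le_of_lt hj) _ k]
    have hAj : A.getD j 0 ∈ A := by
      rw [List.getD_eq_getElem A 0 hj]; exact List.getElem_mem hj
    constructor
    · rintro (h | ⟨p, hp, h1, h2, k', hk', h3, h4⟩)
      · exact Or.inl ⟨h.1, h.2⟩
      · obtain ⟨m, hm, hpeq⟩ := List.mem_iff_getElem.mp hp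
        rw [List.length_zip, length_rowsB] at hm
        have hmj : m < j := lt_of_lt_of_le hm (min_le_right _ _)
        have hmA : m < A.length := lt_of_lt_of_le hm (min_le_left _ _)
        have hp1 : p.1 = A[m] := by
          rw [← hpeq]; rw [List.getElem_zip]
        have hp2 : p.2 = rowAt A a1 m := by
          rw [← hpeq]; rw [List.getElem_zip]
          simp [rowsB_eq_map, List.getElem_map, List.getElem_range]
        refine Or.inr ⟨m, hmj, h2, ?_, hAj, k', ?_, by omega⟩
        · rw [List.getD_eq_getElem A 0 hmA, ← hp1]; omega
        · exact (ih m hmj (lt_trans hmj hj) k').mp (hp2 ▸ hk')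
    · rintro (⟨h1, h2⟩ | ⟨m, hmj, h2, h3, _, k0, hk0, h1⟩)
      · exact Or.inl ⟨h1, h2⟩
      · have hmA : m < A.length := lt_trans hmj hj
        have hk0' : k0 ∈ rowAt A a1 m := (ih m hmj hmA k0).mpr hk0
        refine Or.inr ⟨(A.getD m 0, rowAt A a1 m), ?_, by omega, h2, k0, hk0', by omega, by omega⟩
        rw [List.mem_iff_getElem]
        refine ⟨m, ?_, ?_⟩
        · rw [List.length_zip, length_rowsB]; omega
        · rw [List.getElem_zip]
          simp [rowsB_eq_map, List.getElem_map, List.getElem_range,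
            List.getElem?_eq_getElem hmA, rowAt]

-- B's fold over A builds exactly rowsB A a1 (A.length)
theorem foldB_eq_rowsB (A : List Int) (a1 : Int) :
    A.foldl (fun K pos => K ++ [rowB a1 pos (A.zip K)]) ([] : List (PySem.Set Int)) =
      rowsB A a1 A.length := by
  suffices h : ∀ i ≤ A.length,
      (A.take i).foldl (fun K pos => K ++ [rowB a1 pos (A.zip K)]) ([] : List (PySem.Set Int)) =
        rowsB A a1 i by
    have := h A.length (le_refl _)
    rwa [List.take_length] at this
  intro i hi
  induction i with
  | zero => rfl
  | succ i ih =>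
    have hilt : i < A.length := hi
    rw [List.take_add_one, List.getElem?_eq_getElem hilt, Option.toList_some,
      List.foldl_append, List.foldl_cons, List.foldl_nil, ih (Nat.le_of_lt hilt), rowsB,
      List.getD_eq_getElem A 0 hilt]

theorem set_nonempty_iff (s : PySem.Set Int) : 0 < PySem.Set.len s ↔ ∃ k, k ∈ s := by
  rw [show PySem.Set.len s = s.length from rfl]
  cases s with
  | nil => simp
  | cons x t => simp

theorem foldA_eq_take (A : List Int) (m : PySem.Dict Int (PySem.Set Int))
    (h : 1 ≤ A.length) :
    (PySem.List.pyRange 0 ((A.length : Int) - 1) 1).foldl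
      (fun d i => stepPos d (PySem.List.pyGetD A i 0)) m =
      (A.take (A.length - 1)).foldl stepPos m := by
  have hdl : A.take (A.length - 1) = A.dropLast := List.dropLast_eq_take.symm
  rw [hdl]
  have hlen : (A.length : Int) - 1 = (A.dropLast.length : Int) := by
    rw [List.length_dropLast]; omega
  rw [hlen]
  have hcongr : (PySem.List.pyRange 0 ((A.dropLast.length : Int)) 1).foldl
      (fun d i => stepPos d (PySem.List.pyGetD A i 0)) m =
      (PySem.List.pyRange 0 ((A.dropLast.length : Int)) 1).foldl
      (fun d i => stepPos d (PySem.List.pyGetD A.dropLast i 0)) m := by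
    apply PySem.List.foldl_congr_mem'
    intro i hi acc
    rw [PySem.List.mem_pyRange_one] at hi
    obtain ⟨h1, h2⟩ := hi
    have h2' : i.toNat < A.dropLast.length := by omega
    have h3 : i.toNat < A.length := by rw [List.length_dropLast] at h2'; omega
    have hi' : i = ((i.toNat : ℕ) : Int) := by omega
    rw [hi', PySem.List.pyGetD_natCast, PySem.List.pyGetD_natCast,
        List.getD_eq_getElem _ _ h3, List.getD_eq_getElem _ _ h2', List.getElem_dropLast]
  rw [hcongr]
  exact PySem.List.foldl_pyRange_zero_pyGetD' A.dropLast 0 stepPos m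

theorem solve_eq_solve_alt (A : List Int) (hpre : 2 ≤ A.length) : solve A = solve_alt A := by
  obtain ⟨a0, a1, rest, rfl⟩ : ∃ a0 a1 rest, A = a0 :: a1 :: rest := by
    match A, hpre with
    | a0 :: a1 :: rest, _ => exact ⟨a0, a1, rest, rfl⟩
  set A := a0 :: a1 :: rest with hA
  have h0 : PySem.List.pyGet? A 0 = some a0 := PySem.List.pyGet?_zero_cons a0 (a1 :: rest)
  have h1 : PySem.List.pyGet? A 1 = some a1 := by
    simp [hA, PySem.List.pyGet?, PySem.List.pyIdx?]
  have hAne : A ≠ [] := by simp [hA]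
  have hlen2 : 2 ≤ A.length := by simp [hA]
  have ha1 : a1 ∈ A := by simp [hA]
  unfold solve solve_alt
  rw [h0, h1]
  simp only [Option.getD_some]
  split
  · rfl
  · have hn1 : A.length - 1 < A.length := by omega
    -- A's final dict is dAt A a1 (A.length - 1)
    have hAfold : (PySem.List.pyRange 0 ((A.length : Int) - 1) 1).foldl
        (fun d i => stepPos d (PySem.List.pyGetD A i 0))
        ((A.foldl (fun d pos => d.insert pos PySem.Set.empty) PySem.Dict.empty).modify a1
          PySem.Set.empty (fun s => PySem.Set.add s 1)) =
        dAt A a1 (A.length - 1) := by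
      show (PySem.List.pyRange 0 ((A.length : Int) - 1) 1).foldl
        (fun d i => stepPos d (PySem.List.pyGetD A i 0)) (initD A a1) = _
      rw [foldA_eq_take A (initD A a1) (by omega)]
      rfl
    -- B's list K is rowsB A a1 A.length, and K[-1] is rowAt A a1 (A.length - 1)
    have hK : A.foldl (fun K pos => K ++ [rowB a1 pos (A.zip K)]) ([] : List (PySem.Set Int)) =
        rowsB A a1 A.length := foldB_eq_rowsB A a1
    have hKne : rowsB A a1 A.length ≠ [] := by
      intro hnil
      have h := length_rowsB A a1 A.length
      rw [hnil] at h
      simp [hA] at h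
    have hKlast : PySem.List.pyGetD (rowsB A a1 A.length) (-1) PySem.Set.empty =
        rowAt A a1 (A.length - 1) := by
      rw [PySem.List.pyGetD_neg_ofNat (rowsB A a1 A.length) 1 PySem.Set.empty (by omega)
        (by rw [length_rowsB]; omega)]
      simp only [rowsB_eq_map, List.getElem_map, List.getElem_range,
        List.length_map, List.length_range]
    have hAlast : PySem.List.pyGetD A (-1) 0 = A.getD (A.length - 1) 0 := by
      rw [PySem.List.pyGetD_neg_ofNat A 1 0 (by omega) (by omega),
        List.getD_eq_getElem A 0 hn1]
    simp only [hAfold, hK, hKlast, hAlast]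
    refine if_congr ?_ rfl rfl
    rw [set_nonempty_iff, set_nonempty_iff]
    exact exists_congr fun k => (row_eq_snapshot A a1 ha1 (A.length - 1) hn1 k).symm

-- ===== VERDICT (by name: the statement is the Claim_ definition above) =====
theorem solve_spec : Claim_equal_solve := by
  intro A _ hpre
  exact solve_eq_solve_alt A hpre
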